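-- pv_equiv track=rewrite | github.com/miga-choi/coding-test | leetcode/algorithms/661_image_smoother/main.py | smoothen
-- ===== SOURCE A (Python) =====
-- from typing import List
--
-- def smoothen(img: List[List[int]], x: int, y: int) -> int:
--     m, n = len(img), len(img[0])
--     _sum, count = 0, 0
--
--     for i in range(-1, 2):
--         for j in range(-1, 2):
--             nx, ny = x + i, y + j
--             if 0 <= nx < m and 0 <= ny < n:
--                 _sum += img[nx][ny]
--                 count += 1
--
--     return _sum // count
-- ===== SOURCE B (Python) =====
-- from typing import List
--
-- def smoothen(img: List[List[int]], x: int, y: int) -> int: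
--     m, n = len(img), len(img[0])
--     lo_x, hi_x = max(0, x - 1), min(m, x + 2)
--     lo_y, hi_y = max(0, y - 1), min(n, y + 2)
--     total, count = 0, 0
--     for row in img[lo_x:hi_x]:
--         seg = row[lo_y:hi_y]
--         total += sum(seg)
--         count += len(seg)
--     return total // count
-- ===== Notes on version B (the rewrite author's own statement) =====
-- stated objective: simpler
-- what changed: B clamps the 3x3 window bounds once up front and then slice-sums whole sub-rows (total/count via row slices), replacing A's nine per-cell bounds checks inside a nested -1..1 offset loop.
import Mathlib
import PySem

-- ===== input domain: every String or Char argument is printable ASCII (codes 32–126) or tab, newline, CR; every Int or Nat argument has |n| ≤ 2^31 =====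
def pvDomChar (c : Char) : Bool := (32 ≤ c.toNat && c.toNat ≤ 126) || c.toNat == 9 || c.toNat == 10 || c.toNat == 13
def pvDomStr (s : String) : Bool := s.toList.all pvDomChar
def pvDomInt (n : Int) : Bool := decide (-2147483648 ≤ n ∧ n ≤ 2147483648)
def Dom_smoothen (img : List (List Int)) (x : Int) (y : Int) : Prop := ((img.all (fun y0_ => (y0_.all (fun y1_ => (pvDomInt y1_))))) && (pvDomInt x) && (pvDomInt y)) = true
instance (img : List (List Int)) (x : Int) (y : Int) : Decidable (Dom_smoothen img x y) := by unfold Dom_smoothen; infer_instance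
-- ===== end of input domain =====

-- B computes the clamped 3x3 window bounds once and slice-sums sub-rows, replacing A's per-cell bounds checks (objective: simpler).


-- ===== PORT A =====
def smoothen (img : List (List Int)) (x : Int) (y : Int) : Int :=
  let m : Int := img.length
  let n : Int := (PySem.List.pyGetD img 0 []).length
  let st : Int × Int :=
    (PySem.List.pyRange (-1) 2 1).foldl (fun s i =>
      (PySem.List.pyRange (-1) 2 1).foldl (fun s j =>
        if (0 ≤ x + i ∧ x + i < m) ∧ (0 ≤ y + j ∧ y + j < n) then
          (s.1 + PySem.List.pyGetD (PySem.List.pyGetD img (x + i) []) (y + j) 0, s.2 + 1)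
        else s) s) (0, 0)
  PySem.Int.floordiv st.1 st.2

-- ===== PORT B =====
def smoothen_alt (img : List (List Int)) (x : Int) (y : Int) : Int :=
  let m : Int := img.length
  let n : Int := (PySem.List.pyGetD img 0 []).length
  let st : Int × Int :=
    (PySem.List.slice img (some (max 0 (x - 1))) (some (min m (x + 2)))).foldl (fun s row =>
      let seg := PySem.List.slice row (some (max 0 (y - 1))) (some (min n (y + 2)))
      (s.1 + seg.sum, s.2 + (seg.length : Int))) (0, 0)
  PySem.Int.floordiv st.1 st.2

-- ===== PRECONDITION & SPEC =====
-- Pre_ is exactly where the Python A returns: nonempty image (else IndexError on img[0]),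
-- a nonempty clamped window in both dimensions (else count = 0 and ZeroDivisionError),
-- and every row inside the window long enough for the column window (else IndexError).
def Pre_smoothen (img : List (List Int)) (x : Int) (y : Int) : Prop :=
  img ≠ [] ∧
  max 0 (x - 1) < min (img.length : Int) (x + 2) ∧
  max 0 (y - 1) < min ((PySem.List.pyGetD img 0 []).length : Int) (y + 2) ∧
  ∀ r ∈ PySem.List.slice img (some (max 0 (x - 1))) (some (min (img.length : Int) (x + 2))),
    min ((PySem.List.pyGetD img 0 []).length : Int) (y + 2) ≤ (r.length : Int)
instance (img : List (List Int)) (x : Int) (y : Int) : Decidable (Pre_smoothen img x y) := by unfold Pre_smoothen; infer_instance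

def pvWitness_smoothen : List (List Int) × Int × Int := ([[1, 2], [3, 4]], 0, 0)

def Spec_smoothen (img : List (List Int)) (x : Int) (y : Int) (out : Int) : Prop := out = smoothen_alt img x y
instance (img : List (List Int)) (x : Int) (y : Int) (out : Int) : Decidable (Spec_smoothen img x y out) := by unfold Spec_smoothen; infer_instance

-- ===== CLAIM (what is proved, stated in full; the proofs are below) =====
def Claim_equal_smoothen : Prop := ∀ (img : List (List Int)) (x : Int) (y : Int), Dom_smoothen img x y → Pre_smoothen img x y → Spec_smoothen img x y (smoothen img x y)

-- ===== LEMMAS AND PROOFS =====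

-- a sum over offsets j of g (p + j) is a sum over the shifted range
theorem pv_map_shift (g : Int → Int) (p lo hi : Int) :
    (PySem.List.pyRange lo hi 1).map (fun j => g (p + j))
      = (PySem.List.pyRange (p + lo) (p + hi) 1).map g := by
  rw [PySem.List.pyRange_one lo hi, PySem.List.pyRange_one (p + lo) (p + hi), List.map_map, List.map_map]
  rw [show p + hi - (p + lo) = hi - lo by ring]
  refine List.map_congr_left ?_
  intro k _
  simp only [Function.comp]
  ring_nf

-- guarded sum over an interval equals the plain sum over the clamped interval
theorem pv_sum_ite_mem (f : Int → Int) (A B lo : Int) (k : Nat) :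
    ((PySem.List.pyRange lo (lo + k) 1).map (fun t => if A ≤ t ∧ t < B then f t else 0)).sum
      = ((PySem.List.pyRange (max lo A) (min (lo + k) B) 1).map f).sum := by
  induction k with
  | zero =>
      rw [show lo + ((0:Nat):Int) = lo by push_cast; ring]
      rw [PySem.List.pyRange_one_eq_nil (le_refl lo), PySem.List.pyRange_one_eq_nil (by omega)]
      simp
  | succ k ih =>
      rw [show lo + ((k+1:Nat):Int) = (lo + (k:Nat)) + 1 by push_cast; ring,
          PySem.List.pyRange_one_succ_right (by omega)]
      rw [List.map_append, List.sum_append, ih]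
      by_cases hA : A ≤ lo + (k:Int)
      · by_cases hB : lo + (k:Int) < B
        · rw [show min ((lo + (k:Int)) + 1) B = (min (lo + (k:Int)) B) + 1 by omega,
              PySem.List.pyRange_one_succ_right (by omega)]
          rw [show min (lo + (k:Int)) B = lo + (k:Int) by omega]
          simp [hA, hB]
        · rw [show min ((lo + (k:Int)) + 1) B = min (lo + (k:Int)) B by omega]
          simp [hB]
      · have h1 : PySem.List.pyRange (max lo A) (min ((lo + (k:Int)) + 1) B) 1 = ([] : List Int) :=
          PySem.List.pyRange_one_eq_nil (by omega)
        have h2 : PySem.List.pyRange (max lo A) (min (lo + (k:Int)) B) 1 = ([] : List Int) :=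
          PySem.List.pyRange_one_eq_nil (by omega)
        rw [h1, h2]
        simp [hA]

-- the 3-wide guarded offset sum is the sum over the clamped window
theorem pv_dim (f : Int → Int) (p L : Int) :
    ((PySem.List.pyRange (-1) 2 1).map (fun j => if 0 ≤ p + j ∧ p + j < L then f (p + j) else 0)).sum
      = ((PySem.List.pyRange (max 0 (p - 1)) (min L (p + 2)) 1).map f).sum := by
  rw [pv_map_shift (fun t => if 0 ≤ t ∧ t < L then f t else 0) p (-1) 2]
  rw [show p + 2 = (p + -1) + ((3:Nat):Int) by push_cast; ring]
  rw [pv_sum_ite_mem f 0 L (p + -1) 3]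
  rw [show max (p + -1) 0 = max 0 (p - 1) by omega,
      show (p + -1) + ((3:Nat):Int) = p + 2 by push_cast; ring,
      show min (p + 2) L = min L (p + 2) by omega]

-- a Python slice with straight in-range bounds is a map over the index range
theorem pv_slice_eq_map {α : Type} (d : α) (L : List α) (a b : Int)
    (ha : 0 ≤ a) (hab : a ≤ b) (hb : b ≤ (L.length : Int)) :
    PySem.List.slice L (some a) (some b)
      = (PySem.List.pyRange a b 1).map (fun t => PySem.List.pyGetD L t d) := by
  rw [PySem.List.slice_toNat L ha (by omega)]
  apply List.ext_getElem
  · simp [PySem.List.length_pyRange_one]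
    omega
  · intro i h1 h2
    have hi : a.toNat + i < L.length := by
      simp at h1
      omega
    simp only [List.getElem_take, List.getElem_drop, List.getElem_map,
      PySem.List.getElem_pyRange_one]
    rw [PySem.List.pyGetD_eq_getElem _ _ (by omega) (by omega)]
    congr 1
    omega

-- componentwise pair fold is the pair of mapped sums
theorem pv_foldl_pair {α : Type} (l : List α) (h1 h2 : α → Int) (s : Int × Int) :
    l.foldl (fun s z => (s.1 + h1 z, s.2 + h2 z)) s
      = (s.1 + (l.map h1).sum, s.2 + (l.map h2).sum) := by
  induction l generalizing s with
  | nil => simp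
  | cons a l ih => simp [ih]; constructor <;> ring

theorem pv_ite_pull {α : Type} (P : Prop) [Decidable P] (l : List α) (h : α → Int) :
    (l.map (fun j => if P then h j else 0)).sum = if P then (l.map h).sum else 0 := by
  split_ifs <;> simp

-- both loops compute the same (sum, count) state
theorem pv_states (img : List (List Int)) (x y : Int)
    (hx : max 0 (x - 1) < min (img.length : Int) (x + 2))
    (hy : max 0 (y - 1) < min ((PySem.List.pyGetD img 0 []).length : Int) (y + 2))
    (hrows : ∀ r ∈ PySem.List.slice img (some (max 0 (x - 1))) (some (min (img.length : Int) (x + 2))),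
      min ((PySem.List.pyGetD img 0 []).length : Int) (y + 2) ≤ (r.length : Int)) :
    (PySem.List.pyRange (-1) 2 1).foldl (fun s i =>
      (PySem.List.pyRange (-1) 2 1).foldl (fun s j =>
        if (0 ≤ x + i ∧ x + i < (img.length : Int)) ∧
           (0 ≤ y + j ∧ y + j < ((PySem.List.pyGetD img 0 []).length : Int)) then
          (s.1 + PySem.List.pyGetD (PySem.List.pyGetD img (x + i) []) (y + j) 0, s.2 + 1)
        else s) s) ((0:Int), (0:Int))
    = (PySem.List.slice img (some (max 0 (x - 1))) (some (min (img.length : Int) (x + 2)))).foldl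
        (fun s row =>
          (s.1 + (PySem.List.slice row (some (max 0 (y - 1)))
                    (some (min ((PySem.List.pyGetD img 0 []).length : Int) (y + 2)))).sum,
           s.2 + ((PySem.List.slice row (some (max 0 (y - 1)))
                    (some (min ((PySem.List.pyGetD img 0 []).length : Int) (y + 2)))).length : Int)))
        ((0:Int), (0:Int)) := by
  set m : Int := (img.length : Int) with hm
  set n : Int := ((PySem.List.pyGetD img 0 []).length : Int) with hn
  set ax : Int := max 0 (x - 1) with hax
  set bx : Int := min m (x + 2) with hbx
  set ay : Int := max 0 (y - 1) with hay
  set by' : Int := min n (y + 2) with hby'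
  have hax0 : 0 ≤ ax := le_max_left _ _
  have haxbx : ax ≤ bx := le_of_lt hx
  have hbxm : bx ≤ m := min_le_left _ _
  have hay0 : 0 ≤ ay := le_max_left _ _
  have hayby : ay ≤ by' := le_of_lt hy
  -- B's side
  have hslice : PySem.List.slice img (some ax) (some bx)
      = (PySem.List.pyRange ax bx 1).map (fun t => PySem.List.pyGetD img t []) :=
    pv_slice_eq_map [] img ax bx hax0 haxbx hbxm
  have hrow : ∀ t ∈ PySem.List.pyRange ax bx 1,
      PySem.List.slice (PySem.List.pyGetD img t []) (some ay) (some by')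
        = (PySem.List.pyRange ay by' 1).map
            (fun u => PySem.List.pyGetD (PySem.List.pyGetD img t []) u 0) := by
    intro t ht
    have hmem : PySem.List.pyGetD img t [] ∈ PySem.List.slice img (some ax) (some bx) := by
      rw [hslice]; exact List.mem_map_of_mem ht
    exact pv_slice_eq_map 0 _ ay by' hay0 hayby (hrows _ hmem)
  have hB : (PySem.List.slice img (some ax) (some bx)).foldl (fun s row =>
        (s.1 + (PySem.List.slice row (some ay) (some by')).sum,
         s.2 + ((PySem.List.slice row (some ay) (some by')).length : Int))) ((0:Int), (0:Int))
      = (((PySem.List.pyRange ax bx 1).map (fun t =>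
            ((PySem.List.pyRange ay by' 1).map
              (fun u => PySem.List.pyGetD (PySem.List.pyGetD img t []) u 0)).sum)).sum,
         ((PySem.List.pyRange ax bx 1).map (fun _ => by' - ay)).sum) := by
    rw [hslice, List.foldl_map, pv_foldl_pair]
    refine Prod.ext ?_ ?_
    · simp only [zero_add]
      exact congrArg List.sum (List.map_congr_left (fun t ht => by rw [hrow t ht]))
    · simp only [zero_add]
      refine congrArg List.sum (List.map_congr_left (fun t ht => ?_))
      rw [hrow t ht]
      simp [PySem.List.length_pyRange_one]
      omega
  -- A's side: inner loop
  have hinner : ∀ (i : Int) (s : Int × Int),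
      (PySem.List.pyRange (-1) 2 1).foldl (fun s j =>
        if (0 ≤ x + i ∧ x + i < m) ∧ (0 ≤ y + j ∧ y + j < n) then
          (s.1 + PySem.List.pyGetD (PySem.List.pyGetD img (x + i) []) (y + j) 0, s.2 + 1)
        else s) s
      = (s.1 + (if 0 ≤ x + i ∧ x + i < m then
            ((PySem.List.pyRange ay by' 1).map
              (fun u => PySem.List.pyGetD (PySem.List.pyGetD img (x + i) []) u 0)).sum else 0),
         s.2 + (if 0 ≤ x + i ∧ x + i < m then by' - ay else 0)) := by
    intro i s
    have hstep : ∀ (s : Int × Int) (j : Int), j ∈ PySem.List.pyRange (-1) 2 1 →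
        (if (0 ≤ x + i ∧ x + i < m) ∧ (0 ≤ y + j ∧ y + j < n) then
            (s.1 + PySem.List.pyGetD (PySem.List.pyGetD img (x + i) []) (y + j) 0, s.2 + 1)
          else s)
        = (s.1 + (if 0 ≤ x + i ∧ x + i < m then
              (if 0 ≤ y + j ∧ y + j < n then
                PySem.List.pyGetD (PySem.List.pyGetD img (x + i) []) (y + j) 0 else 0) else 0),
           s.2 + (if 0 ≤ x + i ∧ x + i < m then (if 0 ≤ y + j ∧ y + j < n then (1:Int) else 0) else 0)) := by
      intro s j _
      by_cases hP : 0 ≤ x + i ∧ x + i < m <;> by_cases hQ : 0 ≤ y + j ∧ y + j < n <;>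
        simp [hP, hQ]
    rw [PySem.List.foldl_congr_mem _ _ _ _ hstep, pv_foldl_pair]
    refine Prod.ext ?_ ?_
    · simp only
      rw [pv_ite_pull, pv_dim (fun u => PySem.List.pyGetD (PySem.List.pyGetD img (x + i) []) u 0) y n]
    · simp only
      rw [pv_ite_pull, pv_dim (fun _ => (1:Int)) y n, PySem.List.sum_map_const_int]
      congr 1
      split_ifs
      · simp [PySem.List.length_pyRange_one]; omega
      · rfl
  -- A's side: outer loop
  have hA : (PySem.List.pyRange (-1) 2 1).foldl (fun s i =>
        (PySem.List.pyRange (-1) 2 1).foldl (fun s j =>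
          if (0 ≤ x + i ∧ x + i < m) ∧ (0 ≤ y + j ∧ y + j < n) then
            (s.1 + PySem.List.pyGetD (PySem.List.pyGetD img (x + i) []) (y + j) 0, s.2 + 1)
          else s) s) ((0:Int), (0:Int))
      = (((PySem.List.pyRange ax bx 1).map (fun t =>
            ((PySem.List.pyRange ay by' 1).map
              (fun u => PySem.List.pyGetD (PySem.List.pyGetD img t []) u 0)).sum)).sum,
         ((PySem.List.pyRange ax bx 1).map (fun _ => by' - ay)).sum) := by
    rw [PySem.List.foldl_congr_mem _ _ _ _ (fun s i hi => hinner i s), pv_foldl_pair]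
    refine Prod.ext ?_ ?_
    · simp only [zero_add]
      rw [pv_dim (fun t => ((PySem.List.pyRange ay by' 1).map
            (fun u => PySem.List.pyGetD (PySem.List.pyGetD img t []) u 0)).sum) x m]
    · simp only [zero_add]
      rw [pv_dim (fun _ => by' - ay) x m]
  rw [hA, hB]

-- ===== VERDICT (by name: the statement is the Claim_ definition above) =====
theorem smoothen_spec : Claim_equal_smoothen := by
  intro img x y _ hpre
  obtain ⟨hne, hx, hy, hrows⟩ := hpre
  unfold Spec_smoothen smoothen smoothen_alt
  simp only []
  rw [pv_states img x y hx hy hrows]
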